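-- pv_equiv track=rewrite | github.com/dafinoer/turbo-fortnight | challange/happy ladybugs.py | already
-- ===== SOURCE A (Python) =====
-- def already(b,len2):
--     len1=len(b)
--     shift=1
--     for i in range(0,len1-1):
--         if not b[i].__eq__(b[i+1]):
--             shift=shift+1
--     if shift is not len2:
--         return False
--     return True
-- ===== SOURCE B (Python) =====
-- def already(b, len2):
--     # run-skipping scan: count maximal consecutive groups directly
--     shift = 0
--     i = 0
--     n = len(b)
--     while i < n:
--         j = i + 1
--         while j < n and b[j] == b[i]:
--             j += 1
--         shift += 1
--         i = j
--     return shift == len2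
-- ===== Notes on version B (the rewrite author's own statement) =====
-- stated objective: alternative
-- what changed: B counts maximal consecutive groups with a run-skipping two-pointer scan (outer loop per run, inner loop skipping equal elements) and compares the count to len2 with ==, instead of A's adjacent-pair boundary count started at shift=1 tested with an `is not` identity comparison.
-- intended difference: On the empty list with len2 in {0,1} (A's shift=1 initialisation reports one group for an empty board) and on inputs whose consecutive-group count equals len2 with len2 > 256 (A's `is not` identity test fails outside CPython's small-int cache, so A returns False despite equal counts): B returns the true comparison of the group count with len2 there, which is the intended value. — e.g. on already([], 0): A returns false, B returns true
import Mathlib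
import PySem

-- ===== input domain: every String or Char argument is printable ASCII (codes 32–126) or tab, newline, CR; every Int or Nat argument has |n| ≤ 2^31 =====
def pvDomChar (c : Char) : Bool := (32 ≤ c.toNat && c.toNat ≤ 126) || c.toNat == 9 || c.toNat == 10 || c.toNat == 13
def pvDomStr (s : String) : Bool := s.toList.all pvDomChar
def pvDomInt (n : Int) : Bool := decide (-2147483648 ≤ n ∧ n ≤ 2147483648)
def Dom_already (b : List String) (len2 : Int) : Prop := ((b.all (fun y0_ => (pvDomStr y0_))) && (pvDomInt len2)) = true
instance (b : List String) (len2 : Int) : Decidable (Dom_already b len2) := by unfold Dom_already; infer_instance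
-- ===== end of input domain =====

-- B counts maximal consecutive groups with a run-skipping two-pointer scan and compares the count
-- to len2 with ==, instead of A's adjacent-pair boundary count started at 1 and `is not` identity
-- test; where A's value is wrong (empty list, and equal counts above 256) B returns the intended
-- comparison (see D_ below).

-- ===== PORT A =====
def already (b : List String) (len2 : Int) : Bool :=
  let len1 : Int := (b.length : Int)
  let shift : Int :=
    (PySem.List.pyRange 0 (len1 - 1) 1).foldl
      (fun shift i =>
        if ¬ (PySem.List.pyGet? b i = PySem.List.pyGet? b (i + 1)) then shift + 1 else shift)
      1
  -- `shift is not len2` ported by hand: CPython object identity on ints. shift ≥ 1 is produced by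
  -- arithmetic, so it is the cached object exactly when ≤ 256; identity with len2 holds iff the
  -- values are equal and len2 ≤ 256. Exact for CPython's small-int cache on this domain.
  if ¬ (shift = len2 ∧ len2 ≤ 256) then false else true

-- ===== PORT B =====
-- inner while loop: advance j past the elements equal to b[i]
-- (fuel = b.length - j is a pure totality guard for the while loop; it never changes the value)
def altInner (b : List String) (i : Nat) : Nat → Nat → Nat
  | 0, j => j
  | fuel + 1, j => if j < b.length ∧ b[j]? = b[i]? then altInner b i fuel (j + 1) else j

-- outer while loop: one iteration per maximal run (fuel = b.length - i, same totality guard)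
def altOuter (b : List String) : Nat → Nat → Int → Int
  | 0, _, shift => shift
  | fuel + 1, i, shift =>
    if i < b.length then altOuter b fuel (altInner b i (b.length - (i + 1)) (i + 1)) (shift + 1)
    else shift

def already_alt (b : List String) (len2 : Int) : Bool :=
  altOuter b b.length 0 0 == len2

-- ===== PRECONDITION & SPEC =====
-- the number of maximal consecutive groups of the input (used only to state D_)
def pvRunCount : List String → Nat
  | [] => 0
  | [_] => 1
  | x :: y :: t => (if x = y then 0 else 1) + pvRunCount (y :: t)

-- On the empty list with len2 ∈ {0,1}, A's shift=1 initialisation reports one group for an empty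
-- board; and when the consecutive-group count equals len2 with len2 > 256, A's `is not` identity
-- test fails outside CPython's small-int cache and returns False despite equal counts; B returns
-- the true comparison of the group count with len2, the intended value, in both cases.
def D_already (b : List String) (len2 : Int) : Prop :=
  (b = [] ∧ (len2 = 0 ∨ len2 = 1)) ∨ (256 < len2 ∧ (pvRunCount b : Int) = len2)
instance (b : List String) (len2 : Int) : Decidable (D_already b len2) := by
  unfold D_already; infer_instance

def Spec_already (b : List String) (len2 : Int) (out : Bool) : Prop :=
  ¬ D_already b len2 → out = already_alt b len2
instance (b : List String) (len2 : Int) (out : Bool) : Decidable (Spec_already b len2 out) := by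
  unfold Spec_already; infer_instance

def pvDiffWitness_already : List String × Int := ([], 0)
def pvDiffWitnessOut_already : Bool × Bool := (false, true)

-- ===== CLAIM (what is proved, stated in full; the proofs are below) =====
def Claim_unchanged_already : Prop := ∀ (b : List String) (len2 : Int), Dom_already b len2 → Spec_already b len2 (already b len2)
def Claim_changed_already : Prop := Dom_already (pvDiffWitness_already.1) (pvDiffWitness_already.2) ∧ D_already (pvDiffWitness_already.1) (pvDiffWitness_already.2) ∧ already (pvDiffWitness_already.1) (pvDiffWitness_already.2) = pvDiffWitnessOut_already.1 ∧ already_alt (pvDiffWitness_already.1) (pvDiffWitness_already.2) = pvDiffWitnessOut_already.2 ∧ pvDiffWitnessOut_already.1 ≠ pvDiffWitnessOut_already.2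
def Claim_exact_already : Prop := ∀ (b : List String) (len2 : Int), Dom_already b len2 → D_already b len2 → already b len2 ≠ already_alt b len2

-- ===== LEMMAS AND PROOFS =====

-- number of adjacent unequal pairs
def diffsB : List String → Nat
  | [] => 0
  | [_] => 0
  | x :: y :: t => (if x = y then 0 else 1) + diffsB (y :: t)

theorem runs_eq_diffs : ∀ (t : List String) (x : String), pvRunCount (x :: t) = 1 + diffsB (x :: t) := by
  intro t
  induction t with
  | nil => intro x; simp [pvRunCount, diffsB]
  | cons y t ih => intro x; simp [pvRunCount, diffsB, ih y]; omega

theorem runs_cons_skip (l : List String) (x : String) :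
    pvRunCount (x :: l) = 1 + pvRunCount (l.dropWhile (fun y => y == x)) := by
  induction l with
  | nil => simp [pvRunCount]
  | cons y t ih =>
    by_cases h : y = x
    · subst h
      simp [pvRunCount, List.dropWhile_cons, ih]
    · have h' : ¬ x = y := fun hc => h hc.symm
      simp [pvRunCount, List.dropWhile_cons, h, h']

theorem le_altInner (b : List String) (i : Nat) :
    ∀ (fuel j : Nat), j ≤ altInner b i fuel j := by
  intro fuel
  induction fuel with
  | zero => intro j; rfl
  | succ fuel ih =>
    intro j
    rw [altInner]
    split
    · have := ih (j + 1); omega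
    · rfl

theorem inner_drop (b : List String) (i : Nat) :
    ∀ (fuel j : Nat), b.length - j ≤ fuel →
      b.drop (altInner b i fuel j) = (b.drop j).dropWhile (fun y => some y == b[i]?) := by
  intro fuel
  induction fuel with
  | zero =>
    intro j hf
    rw [altInner, List.drop_eq_nil_of_le (show b.length ≤ j by omega)]
    simp
  | succ fuel ih =>
    intro j hf
    rw [altInner]
    by_cases h : j < b.length ∧ b[j]? = b[i]?
    · rw [if_pos h]
      rw [ih (j + 1) (by omega), List.drop_eq_getElem_cons h.1, List.dropWhile_cons]
      have ht : (some b[j] == b[i]?) = true := by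
        rw [← List.getElem?_eq_getElem h.1, h.2]; simp
      simp [ht]
    · rw [if_neg h]
      by_cases hj : j < b.length
      · have hne : ¬ b[j]? = b[i]? := fun hc => h ⟨hj, hc⟩
        rw [List.drop_eq_getElem_cons hj, List.dropWhile_cons]
        have : (some b[j] == b[i]?) = false := by
          rw [← List.getElem?_eq_getElem hj]
          simpa using hne
        simp [this]
      · rw [List.drop_eq_nil_of_le (by omega)]
        simp

theorem outer_eq (b : List String) : ∀ (fuel i : Nat) (s : Int),
    b.length - i ≤ fuel → altOuter b fuel i s = s + (pvRunCount (b.drop i) : Int) := by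
  intro fuel
  induction fuel with
  | zero =>
    intro i s h
    rw [altOuter]
    rw [List.drop_eq_nil_of_le (show b.length ≤ i by omega)]
    simp [pvRunCount]
  | succ fuel ih =>
    intro i s h
    rw [altOuter]
    by_cases hi : i < b.length
    · rw [if_pos hi]
      have hj := le_altInner b i (b.length - (i + 1)) (i + 1)
      rw [ih _ _ (by omega)]
      rw [inner_drop b i (b.length - (i + 1)) (i + 1) (by omega)]
      have hbi : b[i]? = some b[i] := (List.getElem?_eq_getElem hi)
      have hpred : (fun y => some y == b[i]?) = (fun y => y == b[i]) := by
        funext y; rw [hbi]; simp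
      rw [hpred]
      rw [List.drop_eq_getElem_cons hi, runs_cons_skip]
      push_cast
      ring
    · rw [if_neg hi, List.drop_eq_nil_of_le (show b.length ≤ i by omega)]
      simp [pvRunCount]

-- A's loop counts adjacent unequal index pairs
def cntA (b : List String) (m : Nat) : Nat :=
  (List.range m).countP (fun i => !(b[i]? == b[(i + 1)]?))

theorem fold_eq_cnt (b : List String) : ∀ (m : Nat) (s : Int),
    (PySem.List.pyRange 0 (m : Int) 1).foldl
      (fun shift i =>
        if ¬ (PySem.List.pyGet? b i = PySem.List.pyGet? b (i + 1)) then shift + 1 else shift)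
      s = s + (cntA b m : Int) := by
  intro m
  induction m with
  | zero => intro s; simp [PySem.List.pyRange_zero_nat, cntA]
  | succ m ih =>
    intro s
    have hsplit : ((m + 1 : Nat) : Int) = (m : Int) + 1 := by push_cast; ring
    rw [hsplit, PySem.List.pyRange_one_succ_right (by positivity), List.foldl_append, ih]
    have hcnt : cntA b (m + 1) = cntA b m + (if ¬ (b[m]? = b[m + 1]?) then 1 else 0) := by
      unfold cntA
      rw [List.range_succ, List.countP_append]
      by_cases h : b[m]? = b[m + 1]? <;> simp [h]
    have hget : PySem.List.pyGet? b ((m : Int)) = b[m]? := by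
      simp [PySem.List.pyGet?_natCast]
    have hget' : PySem.List.pyGet? b ((m : Int) + 1) = b[m + 1]? := by
      exact_mod_cast PySem.List.pyGet?_natCast b (m + 1)
    simp only [List.foldl_cons, List.foldl_nil, hget, hget', hcnt]
    by_cases h : b[m]? = b[m + 1]? <;> simp [h] <;> push_cast <;> ring

theorem cnt_eq_diffs : ∀ (b : List String), cntA b (b.length - 1) = diffsB b := by
  intro b
  match b with
  | [] => simp [cntA, diffsB]
  | [x] => simp [cntA, diffsB]
  | x :: y :: t =>
    have hlen : (x :: y :: t).length - 1 = t.length + 1 := by simp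
    rw [hlen]
    unfold cntA
    rw [List.range_succ_eq_map, List.countP_cons, List.countP_map]
    have ht : ((List.range t.length).countP ((fun i => !((x :: y :: t)[i]? == (x :: y :: t)[i + 1]?)) ∘ Nat.succ)) = cntA (y :: t) ((y :: t).length - 1) := by
      unfold cntA
      apply List.countP_congr
      intro i _
      simp [Function.comp]
    rw [ht, cnt_eq_diffs (y :: t)]
    by_cases h : x = y <;> simp [diffsB, h] <;> omega

theorem shift_eq_runs (x : String) (t : List String) :
    (PySem.List.pyRange 0 (((x :: t).length : Int) - 1) 1).foldl
      (fun shift i =>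
        if ¬ (PySem.List.pyGet? (x :: t) i = PySem.List.pyGet? (x :: t) (i + 1)) then shift + 1 else shift)
      1 = (pvRunCount (x :: t) : Int) := by
  have h1 : (((x :: t).length : Int) - 1) = ((((x :: t).length - 1 : Nat)) : Int) := by
    simp only [List.length_cons, Nat.add_sub_cancel]; push_cast; ring
  rw [h1, fold_eq_cnt (x :: t) ((x :: t).length - 1) 1, cnt_eq_diffs, runs_eq_diffs]
  push_cast; ring

-- the two ports as comparisons of the run count
theorem pvA_eval (b : List String) (len2 : Int) :
    already b len2 = decide ((pvRunCount b : Int) + (if b = [] then 1 else 0) = len2 ∧ len2 ≤ 256) := by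
  match b with
  | [] =>
    simp only [already, List.length_nil, Nat.cast_zero, zero_sub,
      PySem.List.pyRange_one_eq_nil (show (-1 : Int) ≤ 0 by norm_num), List.foldl_nil]
    simp only [pvRunCount, Nat.cast_zero, zero_add, reduceIte]
    by_cases h : (1 : Int) = len2 ∧ len2 ≤ 256
    · simp [h]
    · simp only [h, not_false_iff, if_true]
      simp [h]
  | x :: t =>
    simp only [already]
    rw [shift_eq_runs x t]
    have hne : ((x :: t : List String) = []) = False := by simp
    simp only [hne, if_false, add_zero]
    by_cases h : (pvRunCount (x :: t) : Int) = len2 ∧ len2 ≤ 256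
    · simp [h]
    · simp only [h, not_false_iff, if_true]
      simp [h]

theorem pvB_eval (b : List String) (len2 : Int) :
    already_alt b len2 = decide ((pvRunCount b : Int) = len2) := by
  simp only [already_alt]
  rw [outer_eq b b.length 0 0 (by omega)]
  rw [List.drop_zero, zero_add]
  by_cases h : (pvRunCount b : Int) = len2
  · simp [h]
  · simp [h]

-- ===== VERDICT (by name: the statement is the Claim_ definition above) =====
theorem already_spec : Claim_unchanged_already := by
  intro b len2 _ hD
  rw [pvA_eval, pvB_eval]
  match b with
  | [] =>
    have h2 : len2 ≠ 0 ∧ len2 ≠ 1 := by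
      constructor <;> intro hc <;> exact hD (Or.inl ⟨rfl, by simp [hc]⟩)
    simp [pvRunCount, h2.1, Ne.symm h2.1]
    intro hc
    omega
  | x :: t =>
    have hne : (x :: t : List String) ≠ [] := by simp
    simp only [hne, if_neg, if_false, add_zero]
    by_cases h : (pvRunCount (x :: t) : Int) = len2
    · have hle : len2 ≤ 256 := by
        by_contra hgt
        exact hD (Or.inr ⟨by omega, h⟩)
      simp [h, hle]
    · simp [h]

theorem already_changed : Claim_changed_already := by
  unfold Claim_changed_already
  refine ⟨by decide, by decide, ?_, ?_, by decide⟩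
  · rw [show pvDiffWitness_already = (([] : List String), (0 : Int)) from rfl]
    rw [pvA_eval]; decide
  · rw [show pvDiffWitness_already = (([] : List String), (0 : Int)) from rfl]
    rw [pvB_eval]; decide

theorem already_tight : Claim_exact_already := by
  intro b len2 _ hD
  rw [pvA_eval, pvB_eval]
  rcases hD with ⟨hb, hl⟩ | ⟨hgt, heq⟩
  · subst hb
    rcases hl with h | h <;> subst h <;> decide
  · simp [heq]
    omega
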